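-- pv_equiv track=rewrite | github.com/tiecongli/mark_v | leetcode-practice/leetcode_practice/two_pointers/sliding_windows/leetcode1297_max_num_occurences_substring.py | max_num_occurrences_substring
-- ===== SOURCE A (Python) =====
-- from typing import Dict
-- from collections import defaultdict
--
-- def max_num_occurrences_substring(s: str, max_letters: int, min_size: int, max_size: int) -> int:
--     dt_unique_count: Dict[str, int] = defaultdict(int)
--     dt_occur: Dict[str, int] = defaultdict(int)
--     i = 0
--
--     for j in range(len(s)):
--         dt_unique_count[s[j]] += 1
--
--         while j - i + 1 > min_size:
--             dt_unique_count[s[i]] -= 1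
--             if dt_unique_count[s[i]] == 0:
--                 dt_unique_count.pop(s[i])
--             i += 1
--
--         if j - i + 1 == min_size and len(dt_unique_count) <= max_letters:
--             dt_occur[s[i : j + 1]] += 1
--
--     return max(dt_occur.values(), default=0)
-- ===== SOURCE B (Python) =====
-- def max_num_occurrences_substring(s: str, max_letters: int, min_size: int, max_size: int) -> int:
--     occ = {}
--     for j in range(len(s)):
--         start = j - min_size + 1
--         if start < 0:
--             continue
--         sub = s[start:j + 1]
--         if len(set(sub)) <= max_letters:
--             occ[sub] = occ.get(sub, 0) + 1
--     return max(occ.values(), default=0)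
-- ===== Notes on version B (the rewrite author's own statement) =====
-- stated objective: simpler
-- what changed: Replaced A's two-pointer sliding window with its incrementally maintained per-character frequency dict and inner shrinking while-loop by a single direct loop that, for each end index j, slices the one candidate window s[j-min_size+1:j+1] and counts its distinct letters with set(); Pre_ excludes negative min_size on a nonempty string, where A raises IndexError.
import Mathlib
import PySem

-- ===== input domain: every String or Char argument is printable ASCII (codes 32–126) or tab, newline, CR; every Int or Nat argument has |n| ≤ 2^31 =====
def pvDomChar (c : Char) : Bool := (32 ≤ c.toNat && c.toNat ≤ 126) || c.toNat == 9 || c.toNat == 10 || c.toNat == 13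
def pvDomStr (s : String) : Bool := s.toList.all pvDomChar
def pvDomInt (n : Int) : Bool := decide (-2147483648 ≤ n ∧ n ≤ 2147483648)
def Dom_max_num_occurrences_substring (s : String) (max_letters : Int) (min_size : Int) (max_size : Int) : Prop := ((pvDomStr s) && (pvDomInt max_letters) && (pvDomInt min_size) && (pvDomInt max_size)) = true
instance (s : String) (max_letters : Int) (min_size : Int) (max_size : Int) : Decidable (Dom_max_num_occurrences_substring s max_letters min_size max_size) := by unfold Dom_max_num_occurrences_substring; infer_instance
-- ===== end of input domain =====

-- B replaces A's two-pointer sliding window with incremental frequency dict by a single direct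
-- loop that slices each candidate window and counts its distinct letters with set(); objective: simpler.

-- ===== PORT A =====
-- the inner 'while j - i + 1 > min_size' loop of A (shrinks the window, maintaining the
-- per-character count dict; 'none' from pyGet? is where Python raises IndexError — outside Pre_)
def pvShrinkA (cs : List Char) (mn j i : Int) (du : PySem.Dict Char Int) : Int × PySem.Dict Char Int :=
  if _h : mn < j - i + 1 then
    match PySem.List.pyGet? cs i with
    | none => (i, du)   -- Python raises IndexError here (only reachable when mn < 0, outside Pre_)
    | some c =>
      let v := du.getD c 0 - 1
      let du1 := du.insert c v
      let du2 := if v = 0 then du1.erase c else du1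
      pvShrinkA cs mn j (i + 1) du2
  else (i, du)
termination_by (j + 1 - i - mn).toNat
decreasing_by omega

-- one iteration of A's 'for j in range(len(s))' loop; state = (dt_unique_count, dt_occur, i)
def pvStepA (cs : List Char) (ml mn : Int)
    (st : PySem.Dict Char Int × PySem.Dict (List Char) Int × Int) (j : Int) :
    PySem.Dict Char Int × PySem.Dict (List Char) Int × Int :=
  match PySem.List.pyGet? cs j with
  | none => st   -- unreachable: j ∈ range(len(cs))
  | some c =>
    let du := st.1.insert c (st.1.getD c 0 + 1)
    let p := pvShrinkA cs mn j st.2.2 du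
    if j - p.1 + 1 = mn ∧ (p.2.size : Int) ≤ ml then
      let sub := PySem.List.slice cs (some p.1) (some (j + 1))
      (p.2, st.2.1.insert sub (st.2.1.getD sub 0 + 1), p.1)
    else
      (p.2, st.2.1, p.1)

def max_num_occurrences_substring (s : String) (max_letters : Int) (min_size : Int) (max_size : Int) : Int :=
  let cs := s.toList
  let r := (PySem.List.pyRange 0 cs.length).foldl (pvStepA cs max_letters min_size)
             (PySem.Dict.empty, PySem.Dict.empty, 0)
  PySem.List.maxD r.2.1.values (fun v => v) 0

-- ===== PORT B =====
-- one iteration of B's loop: slice the candidate window directly and count its letters with set()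
def pvStepB (cs : List Char) (ml mn : Int) (docc : PySem.Dict (List Char) Int) (j : Int) :
    PySem.Dict (List Char) Int :=
  let start := j - mn + 1
  if start < 0 then docc
  else
    let sub := PySem.List.slice cs (some start) (some (j + 1))
    if PySem.Set.len (PySem.Set.ofList sub) ≤ ml then
      docc.insert sub (docc.getD sub 0 + 1)
    else docc

def max_num_occurrences_substring_alt (s : String) (max_letters : Int) (min_size : Int) (max_size : Int) : Int :=
  let cs := s.toList
  let occ := (PySem.List.pyRange 0 cs.length).foldl (pvStepB cs max_letters min_size) PySem.Dict.empty
  PySem.List.maxD occ.values (fun v => v) 0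

-- ===== PRECONDITION & SPEC =====
-- Pre_ excludes negative min_size on a nonempty string, where A's shrinking loop runs past the
-- window and raises IndexError (s[i] with i = len(s)); A returns normally everywhere else.
def Pre_max_num_occurrences_substring (s : String) (max_letters : Int) (min_size : Int) (max_size : Int) : Prop :=
  0 ≤ min_size ∨ s = ""
instance (s : String) (max_letters : Int) (min_size : Int) (max_size : Int) : Decidable (Pre_max_num_occurrences_substring s max_letters min_size max_size) := by unfold Pre_max_num_occurrences_substring; infer_instance

def pvWitness_max_num_occurrences_substring : String × Int × Int × Int := ("aabcab", 2, 3, 4)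

def Spec_max_num_occurrences_substring (s : String) (max_letters : Int) (min_size : Int) (max_size : Int) (out : Int) : Prop := out = max_num_occurrences_substring_alt s max_letters min_size max_size
instance (s : String) (max_letters : Int) (min_size : Int) (max_size : Int) (out : Int) : Decidable (Spec_max_num_occurrences_substring s max_letters min_size max_size out) := by unfold Spec_max_num_occurrences_substring; infer_instance

-- ===== CLAIM (what is proved, stated in full; the proofs are below) =====
def Claim_equal_max_num_occurrences_substring : Prop := ∀ (s : String) (max_letters : Int) (min_size : Int) (max_size : Int), Dom_max_num_occurrences_substring s max_letters min_size max_size → Pre_max_num_occurrences_substring s max_letters min_size max_size → Spec_max_num_occurrences_substring s max_letters min_size max_size (max_num_occurrences_substring s max_letters min_size max_size)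


-- ===== LEMMAS AND PROOFS =====

-- A's dt_unique_count dict agrees with the current window w: a key is present iff it
-- occurs in w, with its exact count as value, and the keys are unique.
def pvCntOK (du : PySem.Dict Char Int) (w : List Char) : Prop :=
  du.keys.Nodup ∧ ∀ c : Char, du.get? c = if w.count c = 0 then none else some ((w.count c : Nat) : Int)

-- the window A maintains after the first m iterations: s[max(0, m - min_size) : m]
def pvWin (cs : List Char) (mn : Int) (m : Nat) : List Char :=
  (cs.take m).drop (max 0 ((m : Int) - mn)).toNat

theorem pv_get?_erase_self {κ ν : Type} [BEq κ] [LawfulBEq κ] (d : PySem.Dict κ ν) (k : κ) :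
    (d.erase k).get? k = none := by
  simp only [PySem.Dict.erase, PySem.Dict.get?, Option.map_eq_none_iff, List.find?_eq_none,
    List.mem_filter]
  intro p hp
  simpa using hp.2

theorem pv_get?_erase_of_ne {κ ν : Type} [BEq κ] [LawfulBEq κ] (d : PySem.Dict κ ν) (k k' : κ)
    (h : k' ≠ k) : (d.erase k).get? k' = d.get? k' := by
  obtain ⟨items⟩ := d
  simp only [PySem.Dict.erase, PySem.Dict.get?]
  congr 1
  induction items with
  | nil => rfl
  | cons p rest ih =>
    rw [List.filter_cons]
    by_cases hp : p.1 = k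
    · have h1 : (p.1 == k') = false := by simp [hp, Ne.symm h]
      have h2 : (!p.1 == k) = false := by simp [hp]
      rw [h2, if_neg (by simp), ih, List.find?_cons, h1]
    · have h2 : (!p.1 == k) = true := by simp [hp]
      rw [h2, if_pos rfl, List.find?_cons, List.find?_cons]
      cases hpk : (p.1 == k')
      · exact ih
      · rfl

theorem pv_nodup_keys_erase {κ ν : Type} [BEq κ] (d : PySem.Dict κ ν) (k : κ)
    (h : d.keys.Nodup) : (d.erase k).keys.Nodup := by
  simp only [PySem.Dict.erase, PySem.Dict.keys] at *
  exact ((List.filter_sublist (l := d.items)).map _).nodup h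

theorem pvCntOK_empty : pvCntOK PySem.Dict.empty [] := by
  constructor
  · exact PySem.Dict.nodup_keys_empty
  · intro c; simp [PySem.Dict.get?_empty]

theorem pvCntOK_getD {du : PySem.Dict Char Int} {w : List Char} (h : pvCntOK du w) (c : Char) :
    du.getD c 0 = ((w.count c : Nat) : Int) := by
  rw [PySem.Dict.getD_eq_get?_getD, h.2 c]
  by_cases hc : w.count c = 0 <;> simp [hc]

theorem pvCntOK_insert {du : PySem.Dict Char Int} {w : List Char} (h : pvCntOK du w) (c : Char) :
    pvCntOK (du.insert c (du.getD c 0 + 1)) (w ++ [c]) := by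
  refine ⟨PySem.Dict.nodup_keys_insert _ _ _ h.1, fun c' => ?_⟩
  by_cases hcc : c' = c
  · subst hcc
    rw [PySem.Dict.get?_insert_self, pvCntOK_getD h c']
    simp [List.count_append]
  · rw [PySem.Dict.get?_insert_of_ne _ _ hcc, h.2 c']
    simp [List.count_append, Ne.symm hcc]

theorem pvCntOK_shrink_step {du : PySem.Dict Char Int} {w : List Char} {c : Char}
    (h : pvCntOK du (c :: w)) :
    pvCntOK (if du.getD c 0 - 1 = 0 then (du.insert c (du.getD c 0 - 1)).erase c
             else du.insert c (du.getD c 0 - 1)) w := by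
  have hg : du.getD c 0 = ((c :: w).count c : Int) := pvCntOK_getD h c
  rw [List.count_cons_self] at hg
  by_cases hz : w.count c = 0
  · rw [if_pos (by rw [hg, hz]; ring)]
    refine ⟨pv_nodup_keys_erase _ _ (PySem.Dict.nodup_keys_insert _ _ _ h.1), fun c' => ?_⟩
    by_cases hcc : c' = c
    · subst hcc; rw [pv_get?_erase_self]; simp [hz]
    · rw [pv_get?_erase_of_ne _ _ _ hcc, PySem.Dict.get?_insert_of_ne _ _ hcc, h.2 c']
      simp [Ne.symm hcc]
  · rw [if_neg (by rw [hg]; push_cast; omega)]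
    refine ⟨PySem.Dict.nodup_keys_insert _ _ _ h.1, fun c' => ?_⟩
    by_cases hcc : c' = c
    · subst hcc
      rw [PySem.Dict.get?_insert_self, hg]
      simp [hz]
    · rw [PySem.Dict.get?_insert_of_ne _ _ hcc, h.2 c']
      simp [Ne.symm hcc]

theorem pvCntOK_size {du : PySem.Dict Char Int} {w : List Char} (h : pvCntOK du w) :
    du.size = (PySem.Set.ofList w).length := by
  have hperm : du.keys.Perm (PySem.Set.ofList w) := by
    rw [List.perm_ext_iff_of_nodup h.1 (PySem.Set.nodup_ofList w)]
    intro c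
    rw [PySem.Set.mem_ofList]
    constructor
    · intro hc
      by_contra hw
      have hz : w.count c = 0 := List.count_eq_zero.mpr hw
      have h2 := h.2 c
      rw [if_pos hz] at h2
      exact ((PySem.Dict.get?_eq_none_iff_not_mem_keys du c).mp h2) hc
    · intro hc
      have hcnt : w.count c ≠ 0 := by simpa [List.count_eq_zero] using hc
      by_contra hk
      have h2 := h.2 c
      rw [if_neg hcnt] at h2
      rw [(PySem.Dict.get?_eq_none_iff_not_mem_keys du c).mpr hk] at h2
      simp at h2
  have : du.keys.length = (PySem.Set.ofList w).length := hperm.length_eq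
  simpa [PySem.Dict.keys, PySem.Dict.size] using this

theorem pvShrinkA_spec (cs : List Char) (mn : Int) (hmn : 0 ≤ mn) (j : Nat) (hj : j < cs.length) :
    ∀ (k : Nat) (i : Int) (du : PySem.Dict Char Int), ((j : Int) + 1 - i - mn).toNat = k →
      0 ≤ i → i ≤ (j : Int) + 1 → pvCntOK du ((cs.take (j + 1)).drop i.toNat) →
      ∃ du', pvShrinkA cs mn j i du = (max i ((j : Int) + 1 - mn), du') ∧
        pvCntOK du' ((cs.take (j + 1)).drop (max i ((j : Int) + 1 - mn)).toNat) := by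
  intro k
  induction k with
  | zero =>
    intro i du hk h0 hij hcnt
    have hcond : ¬ mn < (j : Int) - i + 1 := by omega
    rw [pvShrinkA, dif_neg hcond]
    have : max i ((j : Int) + 1 - mn) = i := by omega
    rw [this]
    exact ⟨du, rfl, hcnt⟩
  | succ k ih =>
    intro i du hk h0 hij hcnt
    by_cases hcond : mn < (j : Int) - i + 1
    · have hilen : i.toNat < cs.length := by omega
      have hilt : i.toNat < (cs.take (j + 1)).length := by
        rw [List.length_take]
        omega
      have hget : PySem.List.pyGet? cs i = some (cs[i.toNat]'hilen) := by
        rw [PySem.List.pyGet?_of_nonneg _ h0]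
        exact List.getElem?_eq_getElem hilen
      have hdrop : (cs.take (j + 1)).drop i.toNat
          = (cs[i.toNat]'hilen) :: (cs.take (j + 1)).drop (i.toNat + 1) := by
        rw [List.drop_eq_getElem_cons hilt]
        congr 1
        exact List.getElem_take
      rw [hdrop] at hcnt
      have hstep := pvCntOK_shrink_step hcnt
      have hr := ih (i + 1) _ (by omega) (by omega) (by omega)
        (by
          have : (i + 1).toNat = i.toNat + 1 := by omega
          rw [this]
          exact hstep)
      obtain ⟨du', heq, hinv⟩ := hr
      refine ⟨du', ?_, ?_⟩
      · rw [pvShrinkA, dif_pos hcond, hget]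
        simp only []
        rw [heq]
        congr 1
        omega
      · have : max (i + 1) ((j : Int) + 1 - mn) = max i ((j : Int) + 1 - mn) := by omega
        rw [this] at hinv
        exact hinv
    · rw [pvShrinkA, dif_neg hcond]
      have : max i ((j : Int) + 1 - mn) = i := by omega
      rw [this]
      exact ⟨du, rfl, hcnt⟩

theorem pvFold_spec (cs : List Char) (ml mn : Int) (hmn : 0 ≤ mn) :
    ∀ (m : Nat), m ≤ cs.length →
      ∃ du, pvCntOK du (pvWin cs mn m) ∧
        (PySem.List.pyRange 0 (m : Int)).foldl (pvStepA cs ml mn)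
            (PySem.Dict.empty, PySem.Dict.empty, 0) =
          (du, (PySem.List.pyRange 0 (m : Int)).foldl (pvStepB cs ml mn) PySem.Dict.empty,
            max 0 ((m : Int) - mn)) := by
  intro m
  induction m with
  | zero =>
    intro _
    refine ⟨PySem.Dict.empty, ?_, ?_⟩
    · simpa [pvWin] using pvCntOK_empty
    · have h0 : PySem.List.pyRange 0 ((0 : Nat) : Int) = [] := by decide
      rw [h0]
      simp only [List.foldl_nil]
      congr 2
      omega
  | succ m ihm =>
    intro hm1
    have hm : m < cs.length := by omega
    obtain ⟨du, hcnt, hfold⟩ := ihm (by omega)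
    have hi0 : (0 : Int) ≤ max 0 ((m : Int) - mn) := le_max_left _ _
    set i : Int := max 0 ((m : Int) - mn) with hidef
    have hget : PySem.List.pyGet? cs ((m : Nat) : Int) = some (cs[m]'hm) := by
      rw [PySem.List.pyGet?_natCast]
      exact List.getElem?_eq_getElem hm
    have hrange : PySem.List.pyRange 0 (((m + 1 : Nat)) : Int)
        = PySem.List.pyRange 0 ((m : Nat) : Int) ++ [((m : Nat) : Int)] := by
      push_cast
      exact PySem.List.pyRange_one_succ_right (by omega)
    have hcast : ((m + 1 : Nat) : Int) = ((m : Nat) : Int) + 1 := by push_cast; ring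
    rw [hrange, List.foldl_append, List.foldl_append, hfold, hcast]
    simp only [List.foldl_cons, List.foldl_nil]
    -- the inserted character extends the window
    have htake : cs.take (m + 1) = cs.take m ++ [cs[m]'hm] := by
      rw [List.take_add_one]
      simp [List.getElem?_eq_getElem hm]
    have hwin1 : (cs.take (m + 1)).drop i.toNat = pvWin cs mn m ++ [cs[m]'hm] := by
      rw [htake, List.drop_append_of_le_length (by rw [List.length_take]; omega)]
      rfl
    have hins : pvCntOK ((du.insert (cs[m]'hm) (du.getD (cs[m]'hm) 0 + 1)))
        ((cs.take (m + 1)).drop i.toNat) := by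
      rw [hwin1]
      exact pvCntOK_insert hcnt _
    obtain ⟨du2, hshr, hcnt2⟩ := pvShrinkA_spec cs mn hmn m hm
      (((m : Int) + 1 - i - mn).toNat) i _ rfl hi0 (by omega) hins
    have hi' : max i ((m : Int) + 1 - mn) = max 0 ((m : Int) + 1 - mn) := by omega
    rw [hi'] at hshr hcnt2
    -- reduce the A-step and the B-step
    unfold pvStepA pvStepB
    rw [hget]
    simp only [hshr]
    by_cases hstart : ((m : Nat) : Int) - mn + 1 < 0
    · rw [if_pos hstart]
      have hcondA : ¬ (((m : Nat) : Int) - max 0 ((m : Int) + 1 - mn) + 1 = mn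
          ∧ ((du2.size : Int) ≤ ml)) := by
        intro hA
        have h1 : max 0 ((m : Int) + 1 - mn) = 0 := by omega
        rw [h1] at hA
        omega
      rw [if_neg hcondA]
      refine ⟨du2, ?_, ?_⟩
      · have hwin2 : pvWin cs mn (m + 1) = (cs.take (m + 1)).drop (max 0 ((m : Int) + 1 - mn)).toNat := by
          unfold pvWin
          rw [hcast]
        rw [hwin2]
        exact hcnt2
      · rfl
    · rw [if_neg hstart]
      have hieq : max 0 ((m : Int) + 1 - mn) = ((m : Nat) : Int) - mn + 1 := by omega
      have hsub : (cs.take (m + 1)).drop (max 0 ((m : Int) + 1 - mn)).toNat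
          = PySem.List.slice cs (some (((m : Nat) : Int) - mn + 1)) (some (((m : Nat) : Int) + 1)) := by
        rw [PySem.List.slice_toNat _ (by omega) (by omega), List.drop_take, hieq]
        congr 1
      have hsize : (du2.size : Int)
          = PySem.Set.len (PySem.Set.ofList (PySem.List.slice cs (some (((m : Nat) : Int) - mn + 1)) (some (((m : Nat) : Int) + 1)))) := by
        rw [pvCntOK_size hcnt2, hsub, PySem.Set.len]
      have hcond1 : ((m : Nat) : Int) - max 0 ((m : Int) + 1 - mn) + 1 = mn := by omega
      by_cases hml : PySem.Set.len (PySem.Set.ofList (PySem.List.slice cs (some (((m : Nat) : Int) - mn + 1)) (some (((m : Nat) : Int) + 1)))) ≤ ml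
      · rw [if_pos hml, if_pos ⟨hcond1, by rw [hsize]; exact hml⟩]
        refine ⟨du2, ?_, ?_⟩
        · have hwin2 : pvWin cs mn (m + 1) = (cs.take (m + 1)).drop (max 0 ((m : Int) + 1 - mn)).toNat := by
            unfold pvWin; rw [hcast]
          rw [hwin2]
          exact hcnt2
        · rw [hieq]
      · rw [if_neg hml, if_neg (by intro hA; exact hml (by rw [← hsize]; exact hA.2))]
        refine ⟨du2, ?_, ?_⟩
        · have hwin2 : pvWin cs mn (m + 1) = (cs.take (m + 1)).drop (max 0 ((m : Int) + 1 - mn)).toNat := by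
            unfold pvWin; rw [hcast]
          rw [hwin2]
          exact hcnt2
        · rfl

-- ===== VERDICT (by name: the statement is the Claim_ definition above) =====
theorem max_num_occurrences_substring_spec : Claim_equal_max_num_occurrences_substring := by
  intro s ml mn mx _hdom hpre
  unfold Spec_max_num_occurrences_substring
  rcases hpre with hmn | hempty
  · simp only [max_num_occurrences_substring, max_num_occurrences_substring_alt]
    obtain ⟨du, _, hfold⟩ := pvFold_spec s.toList ml mn hmn s.toList.length le_rfl
    rw [hfold]
  · subst hempty
    have hnil : ("" : String).toList = [] := by decide
    have h0 : PySem.List.pyRange 0 (((0 : Nat) : Int)) = [] := by decide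
    simp only [max_num_occurrences_substring, max_num_occurrences_substring_alt, hnil,
      List.length_nil, h0, List.foldl_nil]
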